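-- pv_equiv track=rewrite | github.com/Lanver123/CompeticionProgramacion | Wheres_Waldorf_10010/waldorf.py | build_diag_grid1
-- ===== SOURCE A (Python) =====
-- def build_diag_grid1(grid):
--     offset = [0]*(len(grid[0])-1)
--     aux_grid = [offset + line for line in grid]
--     diag_grid = []
--     for i, line in enumerate(aux_grid):
--         for _ in range(i):
--             line.append(line.pop(0))
--         diag_grid.append(line)
--
--     diag_grid = [(list(line)) for line in zip(*diag_grid)]
--     diag_grid = [[elem for elem in line if elem != 0] for line in diag_grid]
--     return diag_grid
-- ===== SOURCE B (Python) =====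
-- def build_diag_grid1(grid):
--     m = max(len(grid[0]) - 1, 0)
--     ncols = min(m + len(row) for row in grid)
--     out = []
--     for k in range(ncols):
--         diag = []
--         for i, row in enumerate(grid):
--             idx = (k + i) % (m + len(row))
--             if idx >= m and row[idx - m] != 0:
--                 diag.append(row[idx - m])
--         out.append(diag)
--     return out
-- ===== Notes on version B (the rewrite author's own statement) =====
-- stated objective: alternative
-- what changed: Replaces A's pad/rotate-by-popping/zip-transpose/strip pipeline with a direct double loop that computes each diagonal entry by the closed-form modular index idx = (k+i) % (pad+len(row)), skipping zeros on the fly (no intermediate padded/rotated/transposed lists); Pre_ excludes exactly the inputs where A raises IndexError (the empty grid, and first-row width <= 1 with a later empty row).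
import Mathlib
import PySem

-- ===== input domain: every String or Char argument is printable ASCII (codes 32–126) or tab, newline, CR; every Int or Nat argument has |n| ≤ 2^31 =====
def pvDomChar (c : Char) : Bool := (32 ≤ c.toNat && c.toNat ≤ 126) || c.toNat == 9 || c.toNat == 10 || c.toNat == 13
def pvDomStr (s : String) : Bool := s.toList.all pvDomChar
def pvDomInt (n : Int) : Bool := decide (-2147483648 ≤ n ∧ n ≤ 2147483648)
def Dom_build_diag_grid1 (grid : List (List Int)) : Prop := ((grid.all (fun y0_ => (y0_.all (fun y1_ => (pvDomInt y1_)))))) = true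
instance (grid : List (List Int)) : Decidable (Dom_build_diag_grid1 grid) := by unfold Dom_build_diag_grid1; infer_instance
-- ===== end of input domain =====

-- B replaces A's pad/rotate-by-popping/transpose/strip pipeline by one double loop that
-- computes each diagonal entry with a closed-form modular index (objective: alternative).

-- ===== PORT A =====
-- one step of `line.append(line.pop(0))`; Python raises IndexError on an empty line (outside Pre_)
def pvRotStep (l : List Int) : List Int :=
  match l with
  | [] => []
  | x :: xs => xs ++ [x]

-- termination helpers for the zip(*) transpose below
theorem pvSumTailLe (rs : List (List Int)) :
    ((rs.map List.tail).map List.length).sum ≤ (rs.map List.length).sum := by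
  induction rs with
  | nil => simp
  | cons r rs ih =>
    simp only [List.map_cons, List.sum_cons, List.length_tail]
    omega

theorem pvSumTailLt (rows : List (List Int))
    (h : ¬(rows = [] ∨ rows.any List.isEmpty = true)) :
    ((rows.map List.tail).map List.length).sum < (rows.map List.length).sum := by
  have hne : rows ≠ [] := fun hh => h (Or.inl hh)
  have hall : rows.any List.isEmpty = false := by
    cases hh : rows.any List.isEmpty
    · rfl
    · exact absurd (Or.inr hh) h
  cases rows with
  | nil => exact absurd rfl hne
  | cons r rs =>
    simp only [List.any_cons, Bool.or_eq_false_iff] at hall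
    have hr : r ≠ [] := by
      intro hrr; rw [hrr] at hall; simp at hall
    have h1 : r.tail.length < r.length := by
      cases r with
      | nil => exact absurd rfl hr
      | cons a as => simp
    have h2 := pvSumTailLe rs
    simp only [List.map_cons, List.sum_cons]
    omega

-- zip(*rows): transpose truncating at the shortest row; [] when rows is empty
def pvTT (rows : List (List Int)) : List (List Int) :=
  if h : rows = [] ∨ rows.any List.isEmpty = true then []
  else (rows.map (fun r => r.headD 0)) :: pvTT (rows.map List.tail)
termination_by (rows.map List.length).sum
decreasing_by simpa using pvSumTailLt rows h

def build_diag_grid1 (grid : List (List Int)) : List (List Int) :=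
  let offset : List Int := List.replicate ((grid.headD []).length - 1) 0
  let aux_grid := grid.map (fun line => offset ++ line)
  let diag_grid := (PySem.List.enumerate aux_grid 0).map (fun p => pvRotStep^[p.1.toNat] p.2)
  (pvTT diag_grid).map (fun line => line.filter (fun e => decide (e ≠ 0)))

-- ===== PORT B =====
def build_diag_grid1_alt (grid : List (List Int)) : List (List Int) :=
  let m : Int := max (((grid.headD []).length : Int) - 1) 0
  let ncols : Int := PySem.List.minD (grid.map (fun row => m + (row.length : Int))) (fun y => y) 0
  (PySem.List.pyRange 0 ncols 1).map (fun k =>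
    (PySem.List.enumerate grid 0).filterMap (fun p =>
      let idx : Int := PySem.Int.mod (k + p.1) (m + (p.2.length : Int))
      if m ≤ idx ∧ PySem.List.pyGetD p.2 (idx - m) 0 ≠ 0 then
        some (PySem.List.pyGetD p.2 (idx - m) 0)
      else none))

-- ===== PRECONDITION & SPEC =====
-- Pre_ excludes exactly the inputs where Python A raises IndexError: the empty grid
-- (len(grid[0])), and grids of first-row width ≤ 1 with a later empty row (pop from []).
def Pre_build_diag_grid1 (grid : List (List Int)) : Prop :=
  grid ≠ [] ∧ ((grid.headD []).length ≤ 1 → ∀ row ∈ grid.tail, row ≠ [])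

instance (grid : List (List Int)) : Decidable (Pre_build_diag_grid1 grid) := by
  unfold Pre_build_diag_grid1; infer_instance

def pvWitness_build_diag_grid1 : List (List Int) := [[1, 0], [2, 3]]

def Spec_build_diag_grid1 (grid : List (List Int)) (out : List (List Int)) : Prop :=
  out = build_diag_grid1_alt grid
instance (grid : List (List Int)) (out : List (List Int)) : Decidable (Spec_build_diag_grid1 grid out) := by
  unfold Spec_build_diag_grid1; infer_instance

-- ===== CLAIM (what is proved, stated in full; the proofs are below) =====
def Claim_equal_build_diag_grid1 : Prop := ∀ (grid : List (List Int)), Dom_build_diag_grid1 grid → Pre_build_diag_grid1 grid → Spec_build_diag_grid1 grid (build_diag_grid1 grid)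

-- ===== LEMMAS AND PROOFS =====

theorem pvRotStep_one (l : List Int) : pvRotStep l = l.rotate 1 := by
  cases l with
  | nil => simp [pvRotStep]
  | cons x xs => simp [pvRotStep]

theorem pvRotStep_iterate (n : Nat) (l : List Int) : pvRotStep^[n] l = l.rotate n := by
  induction n generalizing l with
  | zero => simp
  | succ n ih =>
    rw [Function.iterate_succ_apply, pvRotStep_one, ih, List.rotate_rotate, Nat.add_comm]

-- zip(*rows) on nonempty rows of minimum length c is column extraction over range c
theorem pvTT_eq (c : Nat) : ∀ (rows : List (List Int)), rows ≠ [] →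
    (∀ r ∈ rows, c ≤ r.length) → (∃ r ∈ rows, r.length = c) →
    pvTT rows = (List.range c).map (fun k => rows.map (fun r => r.getD k 0)) := by
  induction c with
  | zero =>
    intro rows hne hlen hex
    rw [pvTT]
    obtain ⟨r, hr, hrl⟩ := hex
    have hany : rows.any List.isEmpty = true := by
      simp only [List.any_eq_true]
      exact ⟨r, hr, by simp [List.eq_nil_of_length_eq_zero hrl]⟩
    simp [hany]
  | succ c ih =>
    intro rows hne hlen hex
    rw [pvTT]
    have hcond : ¬(rows = [] ∨ rows.any List.isEmpty = true) := by
      intro h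
      rcases h with h | h
      · exact hne h
      · simp only [List.any_eq_true] at h
        obtain ⟨r, hr, hre⟩ := h
        have := hlen r hr
        rw [List.isEmpty_iff.mp hre] at this
        simp at this
    rw [dif_neg hcond]
    have hmn : rows.map List.tail ≠ [] := by
      intro h; exact hne (List.map_eq_nil_iff.mp h)
    have hml : ∀ r ∈ rows.map List.tail, c ≤ r.length := by
      intro r hr
      obtain ⟨s, hs, rfl⟩ := List.mem_map.mp hr
      have := hlen s hs
      simp only [List.length_tail]
      omega
    have hmex : ∃ r ∈ rows.map List.tail, r.length = c := by
      obtain ⟨r, hr, hrl⟩ := hex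
      exact ⟨r.tail, List.mem_map.mpr ⟨r, hr, rfl⟩, by simp [List.length_tail, hrl]⟩
    rw [ih (rows.map List.tail) hmn hml hmex]
    rw [List.range_succ_eq_map, List.map_cons, List.map_map]
    have hhead : rows.map (fun r => r.headD 0) = rows.map (fun r => r.getD 0 0) :=
      List.map_congr_left (fun r _ => by cases r <;> simp)
    have htail : (List.range c).map (fun k => (rows.map List.tail).map (fun r => r.getD k 0))
        = (List.range c).map ((fun k => rows.map (fun r => r.getD k 0)) ∘ Nat.succ) := by
      apply List.map_congr_left
      intro k _
      simp only [Function.comp, List.map_map]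
      apply List.map_congr_left
      intro r hr
      have := hlen r hr
      cases r with
      | nil => simp at this
      | cons a as => simp
    rw [hhead, htail]

theorem rotate_getD (l : List Int) (n k : Nat) (hk : k < l.length) :
    (l.rotate n).getD k 0 = l.getD ((k + n) % l.length) 0 := by
  have h1 : k < (l.rotate n).length := by simpa [List.length_rotate]
  have h2 : (k + n) % l.length < l.length := Nat.mod_lt _ (by omega)
  rw [List.getD_eq_getElem _ _ h1, List.getD_eq_getElem _ _ h2, List.getElem_rotate]

theorem pad_getD (row : List Int) (m q : Nat) :
    (List.replicate m (0:Int) ++ row).getD q 0 =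
      if q < m then 0 else row.getD (q - m) 0 := by
  split
  · next h =>
    rw [List.getD_append _ _ _ _ (by simpa using h)]
    rw [List.getD_eq_getElem _ _ (by simpa using h)]
    simp
  · next h =>
    rw [List.getD_append_right _ _ _ _ (by simp; omega)]
    simp

theorem enumerate_map_snd (f : List Int → List Int) :
    ∀ (xs : List (List Int)) (s : Int),
    PySem.List.enumerate (xs.map f) s
      = (PySem.List.enumerate xs s).map (fun p => (p.1, f p.2)) := by
  intro xs
  induction xs with
  | nil => intro s; simp [PySem.List.enumerate_nil]
  | cons x xs ih => intro s; simp [PySem.List.enumerate_cons, ih]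

theorem filter_map_eq_filterMap {α : Type} (g : α → Int) (p : Int → Bool) (l : List α) :
    ((l.map g).filter p) = l.filterMap (fun x => if p (g x) then some (g x) else none) := by
  induction l with
  | nil => simp
  | cons x xs ih =>
    simp only [List.map_cons, List.filter_cons, List.filterMap_cons]
    cases h : p (g x) <;> simp [ih]

-- folding Int min over a cast Nat list computes the Nat minimum
theorem pvFoldMin (l : List Nat) : ∀ (a : Nat),
    (l.map (fun (n : Nat) => (n : Int))).foldl min ((a : Nat) : Int)
      = ((l.foldl min a : Nat) : Int) := by
  induction l with
  | nil => intro a; rfl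
  | cons b l ih =>
    intro a
    rw [List.map_cons, List.foldl_cons, List.foldl_cons,
        show min ((a:Nat):Int) ((b:Nat):Int) = ((min a b : Nat) : Int) by push_cast; rfl]
    exact ih (min a b)

theorem pvMinD_cast (l : List Nat) (hne : l ≠ []) :
    PySem.List.minD (l.map (fun (n : Nat) => (n : Int))) (fun y => y) 0
      = ((l.min?.getD 0 : Nat) : Int) := by
  cases l with
  | nil => exact absurd rfl hne
  | cons a l =>
    unfold PySem.List.minD
    rw [List.map_cons, PySem.List.min?_id_cons, List.min?_cons']
    simp only [Option.getD_some]
    exact pvFoldMin l a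

-- pointwise core: B's modular-index cell equals A's padded-rotated cell
theorem pvCore (row : List Int) (m i k : Nat) (h1 : 1 ≤ m + row.length) :
    (if (m:Int) ≤ PySem.Int.mod ((k:Int) + (i:Int)) ((m:Int) + (row.length:Int)) ∧
        PySem.List.pyGetD row (PySem.Int.mod ((k:Int) + (i:Int)) ((m:Int) + (row.length:Int)) - (m:Int)) 0 ≠ 0 then
       some (PySem.List.pyGetD row (PySem.Int.mod ((k:Int) + (i:Int)) ((m:Int) + (row.length:Int)) - (m:Int)) 0)
     else none)
    = (if decide (((List.replicate m (0:Int) ++ row).getD ((k + i) % (m + row.length)) 0) ≠ 0) = true then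
         some ((List.replicate m (0:Int) ++ row).getD ((k + i) % (m + row.length)) 0)
       else none) := by
  have hmod : PySem.Int.mod ((k:Int) + (i:Int)) ((m:Int) + (row.length:Int))
      = (((k + i) % (m + row.length) : Nat) : Int) := by
    rw [show ((k:Int) + (i:Int)) = ((k + i : Nat) : Int) by push_cast; ring,
        show ((m:Int) + (row.length:Int)) = ((m + row.length : Nat) : Int) by push_cast; ring]
    exact PySem.Int.mod_natCast _ _
  rw [hmod, pad_getD]
  set p : Nat := (k + i) % (m + row.length) with hp
  have hplt : p < m + row.length := Nat.mod_lt _ (by omega)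
  by_cases hc : p < m
  · rw [if_pos hc]
    have hni : ¬ ((m:Int) ≤ ((p : Nat) : Int)) := by omega
    rw [if_neg (fun h => hni h.1)]
    simp
  · rw [if_neg hc]
    have hj : ((p:Int) - (m:Int)) = ((p - m : Nat) : Int) := by omega
    rw [hj, PySem.List.pyGetD_natCast]
    by_cases hz : row.getD (p - m) 0 ≠ 0
    · rw [if_pos ⟨by omega, hz⟩, if_pos (by simpa using hz)]
    · rw [if_neg (fun h => hz h.2), if_neg (by simpa using hz)]

-- ===== VERDICT (by name: the statement is the Claim_ definition above) =====
theorem build_diag_grid1_spec : Claim_equal_build_diag_grid1 := by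
  intro grid _ hpre
  obtain ⟨hne, -⟩ := hpre
  unfold Spec_build_diag_grid1
  set mN : Nat := (grid.headD []).length - 1 with hmN
  set ws : List Nat := grid.map (fun r => mN + r.length) with hws
  have hwne : ws ≠ [] := by
    rw [hws]; intro h; exact hne (List.map_eq_nil_iff.mp h)
  set cN : Nat := ws.min?.getD 0 with hcN
  have hmin : ws.min? = some cN := by
    cases h : ws.min? with
    | none => exact absurd (List.min?_eq_none_iff.mp h) hwne
    | some a => rw [hcN, h]; rfl
  have hle : ∀ r ∈ grid, cN ≤ mN + r.length := by
    intro r hr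
    exact (List.le_min?_iff hmin).mp le_rfl _ (by rw [hws]; exact List.mem_map.mpr ⟨r, hr, rfl⟩)
  have hex : ∃ r ∈ grid, mN + r.length = cN := by
    have := List.min?_mem hmin
    rw [hws] at this
    obtain ⟨r, hr, hrw⟩ := List.mem_map.mp this
    exact ⟨r, hr, hrw⟩
  set rot : Int × List Int → List Int :=
    (fun p => (List.replicate mN (0:Int) ++ p.2).rotate p.1.toNat) with hrot
  -- A-side characterization
  have hA : build_diag_grid1 grid
      = (List.range cN).map (fun k =>
          (PySem.List.enumerate grid 0).filterMap (fun p =>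
            if decide (((List.replicate mN (0:Int) ++ p.2).getD ((k + p.1.toNat) % (mN + p.2.length)) 0) ≠ 0) = true then
              some ((List.replicate mN (0:Int) ++ p.2).getD ((k + p.1.toNat) % (mN + p.2.length)) 0)
            else none)) := by
    simp only [build_diag_grid1]
    rw [enumerate_map_snd, List.map_map]
    have hfun : ((fun p => pvRotStep^[(Prod.fst p).toNat] p.2) ∘ (fun p : Int × List Int => (p.1, List.replicate mN (0:Int) ++ p.2))) = fun p : Int × List Int => pvRotStep^[p.1.toNat] (List.replicate mN (0:Int) ++ p.2) := rfl
    rw [hfun]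
    have hdiag : (PySem.List.enumerate grid 0).map
          (fun p => pvRotStep^[p.1.toNat] (List.replicate mN (0:Int) ++ p.2))
        = (PySem.List.enumerate grid 0).map rot :=
      List.map_congr_left (fun p _ => pvRotStep_iterate _ _)
    rw [hdiag]
    have hnn : (PySem.List.enumerate grid 0).map rot ≠ [] := by
      intro h
      have := congrArg List.length h
      simp [PySem.List.length_enumerate] at this
      exact hne this
    have hlens : ∀ r ∈ (PySem.List.enumerate grid 0).map rot, cN ≤ r.length := by
      intro r hr
      obtain ⟨p, hp, rfl⟩ := List.mem_map.mp hr
      obtain ⟨t, ht, rfl⟩ := (PySem.List.mem_enumerate_iff grid 0 p).mp hp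
      have := hle _ (List.getElem_mem ht)
      simp [hrot, List.length_rotate]
      omega
    have hlex : ∃ r ∈ (PySem.List.enumerate grid 0).map rot, r.length = cN := by
      obtain ⟨r, hr, hrw⟩ := hex
      obtain ⟨t, ht, rfl⟩ := List.mem_iff_getElem.mp hr
      refine ⟨rot ((0:Int) + (t:Nat), grid[t]), List.mem_map.mpr
        ⟨((0:Int) + (t:Nat), grid[t]), (PySem.List.mem_enumerate_iff grid 0 _).mpr ⟨t, ht, rfl⟩, rfl⟩, ?_⟩
      simp [hrot, List.length_rotate]
      omega
    rw [pvTT_eq cN _ hnn hlens hlex, List.map_map]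
    apply List.map_congr_left
    intro k hk
    simp only [Function.comp_def, List.map_map]
    rw [filter_map_eq_filterMap (fun p => (rot p).getD k 0) (fun e => decide (e ≠ 0))]
    apply List.filterMap_congr
    intro p hp
    obtain ⟨t, ht, rfl⟩ := (PySem.List.mem_enumerate_iff grid 0 p).mp hp
    have hlr : (List.replicate mN (0:Int) ++ grid[t]).length = mN + (grid[t]).length := by
      simp
    have hkl : k < (List.replicate mN (0:Int) ++ grid[t]).length := by
      rw [hlr]
      have := hle _ (List.getElem_mem ht)
      have := List.mem_range.mp hk
      omega
    rw [hrot]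
    rw [rotate_getD _ _ _ hkl, hlr]
  rw [hA]
  -- B-side characterization
  simp only [build_diag_grid1_alt]
  rw [show max (((grid.headD []).length : Int) - 1) 0 = ((mN : Nat) : Int) by rw [hmN]; omega]
  rw [show (grid.map (fun row => ((mN : Nat) : Int) + (row.length : Int)))
        = ws.map (fun (n : Nat) => (n : Int)) by rw [hws, List.map_map]; exact List.map_congr_left (fun r _ => by simp only [Function.comp_apply]; push_cast; ring)]
  rw [pvMinD_cast ws hwne, ← hcN]
  rw [PySem.List.pyRange_one, show (((cN : Nat) : Int) - 0).toNat = cN by omega, List.map_map]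
  apply List.map_congr_left
  intro kn hkn
  simp only [Function.comp_def, zero_add]
  apply List.filterMap_congr
  intro p hp
  obtain ⟨i, hi, rfl⟩ := (PySem.List.mem_enumerate_iff grid 0 p).mp hp
  simp only [zero_add, Int.toNat_natCast]
  have h1 : 1 ≤ mN + (grid[i]).length := by
    have := hle _ (List.getElem_mem hi)
    have := List.mem_range.mp hkn
    omega
  exact (pvCore (grid[i]) mN i kn h1).symm
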